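-- pv_equiv track=rewrite | github.com/laozheng42ban/ArticlesClassification | create_dictionary.py | separate_class
-- ===== SOURCE A (Python) =====
-- def separate_class(datas):
--     labeled_data = {}
--     for i in range(3):
--         labeled_data[i] = []
--     for i in range(len(datas)):
--         if i <= 4:
--             labeled_data[0].append(datas[i])
--         elif i <= 9:
--             labeled_data[1].append(datas[i])
--         else:
--             labeled_data[2].append(datas[i])
--
--     return labeled_data
-- ===== SOURCE B (Python) =====
-- def separate_class(datas):
--     return {0: list(datas[0:5]), 1: list(datas[5:10]), 2: list(datas[10:])}
-- ===== Notes on version B (the rewrite author's own statement) =====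
-- stated objective: simpler
-- what changed: Replaced the per-index branching append loop over a pre-seeded dict with a direct dict literal built from three slices at the boundaries 5 and 10.
import Mathlib
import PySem

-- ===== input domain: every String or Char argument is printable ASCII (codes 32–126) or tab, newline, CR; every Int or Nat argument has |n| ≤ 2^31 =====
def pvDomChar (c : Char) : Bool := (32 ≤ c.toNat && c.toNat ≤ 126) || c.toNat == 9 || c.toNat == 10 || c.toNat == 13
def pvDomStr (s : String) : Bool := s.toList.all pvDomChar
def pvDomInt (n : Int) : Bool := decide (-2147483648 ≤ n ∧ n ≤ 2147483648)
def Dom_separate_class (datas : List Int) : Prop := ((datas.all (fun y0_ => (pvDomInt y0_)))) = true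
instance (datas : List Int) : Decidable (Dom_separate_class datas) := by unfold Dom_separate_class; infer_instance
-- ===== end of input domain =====

-- B replaces A's per-index branching append loop over a pre-seeded dict by a dict literal of three slices; objective: simpler.

-- ===== PORT A =====
def separate_class (datas : List Int) : List (Int × List Int) :=
  let d0 : PySem.Dict Int (List Int) :=
    (PySem.List.pyRange 0 3 1).foldl (fun d i => d.insert i []) PySem.Dict.empty
  let d := (PySem.List.pyRange 0 (datas.length : Int) 1).foldl
    (fun d i =>
      if i ≤ 4 then d.modify 0 [] (fun l => l ++ [PySem.List.pyGetD datas i 0])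
      else if i ≤ 9 then d.modify 1 [] (fun l => l ++ [PySem.List.pyGetD datas i 0])
      else d.modify 2 [] (fun l => l ++ [PySem.List.pyGetD datas i 0]))
    d0
  d.items

-- ===== PORT B =====
def separate_class_alt (datas : List Int) : List (Int × List Int) :=
  [(0, PySem.List.slice datas (some 0) (some 5)),
   (1, PySem.List.slice datas (some 5) (some 10)),
   (2, PySem.List.slice datas (some 10) none)]

-- ===== PRECONDITION & SPEC =====
def Spec_separate_class (datas : List Int) (out : List (Int × List Int)) : Prop := out = separate_class_alt datas
instance (datas : List Int) (out : List (Int × List Int)) : Decidable (Spec_separate_class datas out) := by unfold Spec_separate_class; infer_instance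

-- ===== CLAIM (what is proved, stated in full; the proofs are below) =====
def Claim_equal_separate_class : Prop := ∀ (datas : List Int), Dom_separate_class datas → Spec_separate_class datas (separate_class datas)

-- ===== LEMMAS AND PROOFS =====

-- take/drop of a one-element append, the four shapes the loop step needs
theorem take_app_lt {α : Type} (l : List α) (x : α) (k : Nat) (h : l.length < k) :
    (l ++ [x]).take k = l.take k ++ [x] := by
  rw [List.take_of_length_le (l := l ++ [x]) (by simp; omega), List.take_of_length_le (l := l) (by omega)]

theorem take_app_ge {α : Type} (l : List α) (x : α) (k : Nat) (h : k ≤ l.length) :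
    (l ++ [x]).take k = l.take k := List.take_append_of_le_length h

theorem drop_app_ge {α : Type} (l : List α) (x : α) (k : Nat) (h : k ≤ l.length) :
    (l ++ [x]).drop k = l.drop k ++ [x] := List.drop_append_of_le_length h

theorem drop_app_lt {α : Type} (l : List α) (x : α) (k : Nat) (h : l.length < k) :
    (l ++ [x]).drop k = [] := List.drop_eq_nil_of_le (by simp; omega)

-- invariant of A's main loop: after processing indices 0..n-1 the dict holds the three
-- segments of the prefix datas.take n
theorem separate_loop_items (datas : List Int) (n : Nat) (hn : n ≤ datas.length) :
    ((PySem.List.pyRange 0 (n : Int) 1).foldl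
      (fun (d : PySem.Dict Int (List Int)) i =>
        if i ≤ 4 then d.modify 0 [] (fun l => l ++ [PySem.List.pyGetD datas i 0])
        else if i ≤ 9 then d.modify 1 [] (fun l => l ++ [PySem.List.pyGetD datas i 0])
        else d.modify 2 [] (fun l => l ++ [PySem.List.pyGetD datas i 0]))
      ((PySem.List.pyRange 0 3 1).foldl (fun d i => d.insert i []) PySem.Dict.empty))
    = PySem.Dict.mk [(0, (datas.take n).take 5),
                     (1, ((datas.take n).drop 5).take 5),
                     (2, (datas.take n).drop 10)] := by
  induction n with
  | zero => rfl
  | succ m ih =>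
    have hm : m ≤ datas.length := Nat.le_of_succ_le hn
    have hlt : m < datas.length := hn
    have hcast : ((m + 1 : Nat) : Int) = (m : Int) + 1 := by push_cast; ring
    rw [hcast, PySem.List.pyRange_one_succ_right (a := 0) (b := (m : Int)) (by positivity),
        List.foldl_append, ih hm]
    have hget : PySem.List.pyGetD datas (m : Int) 0 = datas[m] := by
      rw [PySem.List.pyGetD_eq_getElem datas 0 (by positivity) (by exact_mod_cast hlt)]
      simp
    have htake : datas.take (m + 1) = datas.take m ++ [datas[m]] :=
      List.take_succ_eq_append_getElem hlt
    have hlen : (datas.take m).length = m := List.length_take_of_le hm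
    simp only [List.foldl_cons, List.foldl_nil, hget, htake]
    by_cases h4 : (m : Int) ≤ 4
    · have hm4 : m ≤ 4 := by exact_mod_cast h4
      rw [if_pos h4]
      apply PySem.Dict.ext
      simp only [PySem.Dict.modify, PySem.Dict.getD, PySem.Dict.get?, PySem.Dict.insert,
        PySem.Dict.contains]
      norm_num
      refine ⟨?_, ?_, ?_⟩
      · rw [htake, take_app_lt _ _ _ (by omega)]
      · rw [htake, drop_app_lt _ _ _ (by omega), List.drop_eq_nil_of_le (by omega)]
      · rw [htake, drop_app_lt _ _ _ (by omega), List.drop_eq_nil_of_le (by omega)]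
    · by_cases h9 : (m : Int) ≤ 9
      · have hm5 : 5 ≤ m := by omega
        have hm9 : m ≤ 9 := by exact_mod_cast h9
        rw [if_neg h4, if_pos h9]
        apply PySem.Dict.ext
        simp only [PySem.Dict.modify, PySem.Dict.getD, PySem.Dict.get?, PySem.Dict.insert,
          PySem.Dict.contains]
        norm_num
        refine ⟨?_, ?_, ?_⟩
        · rw [htake, take_app_ge _ _ _ (by omega)]
        · rw [htake, drop_app_ge _ _ _ (by omega),
              take_app_lt _ _ _ (by simp [hlen]; omega)]
        · rw [htake, drop_app_lt _ _ _ (by omega), List.drop_eq_nil_of_le (by omega)]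
      · have hm10 : 10 ≤ m := by omega
        rw [if_neg h4, if_neg h9]
        apply PySem.Dict.ext
        simp only [PySem.Dict.modify, PySem.Dict.getD, PySem.Dict.get?, PySem.Dict.insert,
          PySem.Dict.contains]
        norm_num
        refine ⟨?_, ?_, ?_⟩
        · rw [htake, take_app_ge _ _ _ (by omega)]
        · rw [htake, drop_app_ge _ _ _ (by omega),
              take_app_ge _ _ _ (by simp [hlen]; omega)]
        · rw [htake, drop_app_ge _ _ _ (by omega)]

-- ===== VERDICT (by name: the statement is the Claim_ definition above) =====
theorem separate_class_spec : Claim_equal_separate_class := by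
  intro datas _
  unfold Spec_separate_class
  simp only [separate_class, separate_class_alt]
  rw [separate_loop_items datas datas.length le_rfl]
  rw [PySem.List.slice_toNat datas (by norm_num) (by norm_num),
      PySem.List.slice_toNat datas (by norm_num) (by norm_num),
      PySem.List.slice_from datas (by norm_num)]
  simp
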